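-- pv_equiv track=rewrite | github.com/LiliiaMykhaliuk/think-python | chapter13/13.1.8.py | perform_markov_analysis
-- ===== SOURCE A (Python) =====
-- def perform_markov_analysis(words_list):
--     """Performs Markov analysis with given words"""
--
--     markov_dict = {}
--
--     # Perform Markov analysis
--     for i, word in enumerate(words_list):
--
--         # Last 2 words can't be a prefix
--         if i > len(words_list) - 3:
--             break
--
--         # Get prefix (2 words)
--         prefix = " ".join([word, words_list[i + 1]])
--
--         # Get suffix (next word after prefix)
--         suffix = words_list[i + 2]
--
--         # Add prefix and suffix to the dict
--         markov_dict.setdefault(prefix, [suffix])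
--
--         if suffix not in markov_dict[prefix]:
--             markov_dict[prefix].append(suffix)
--
--     return markov_dict
-- ===== SOURCE B (Python) =====
-- def perform_markov_analysis(words_list):
--     """Performs Markov analysis with given words"""
--
--     # Pass 1: group every suffix under its 2-word prefix, duplicates included.
--     markov_dict = {}
--     for w1, w2, w3 in zip(words_list, words_list[1:], words_list[2:]):
--         markov_dict.setdefault(" ".join([w1, w2]), []).append(w3)
--
--     # Pass 2: order-preserving de-duplication of each suffix list.
--     return {prefix: list(dict.fromkeys(suffixes))
--             for prefix, suffixes in markov_dict.items()}
-- ===== Notes on version B (the rewrite author's own statement) =====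
-- stated objective: alternative
-- what changed: A deduplicates suffixes on insertion inside a single index-and-break loop with membership tests against the growing dict values; B instead zips the list into consecutive triples, groups ALL suffixes (duplicates included) in one pass, and then de-duplicates each suffix list in a separate second pass via dict.fromkeys.
import Mathlib
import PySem

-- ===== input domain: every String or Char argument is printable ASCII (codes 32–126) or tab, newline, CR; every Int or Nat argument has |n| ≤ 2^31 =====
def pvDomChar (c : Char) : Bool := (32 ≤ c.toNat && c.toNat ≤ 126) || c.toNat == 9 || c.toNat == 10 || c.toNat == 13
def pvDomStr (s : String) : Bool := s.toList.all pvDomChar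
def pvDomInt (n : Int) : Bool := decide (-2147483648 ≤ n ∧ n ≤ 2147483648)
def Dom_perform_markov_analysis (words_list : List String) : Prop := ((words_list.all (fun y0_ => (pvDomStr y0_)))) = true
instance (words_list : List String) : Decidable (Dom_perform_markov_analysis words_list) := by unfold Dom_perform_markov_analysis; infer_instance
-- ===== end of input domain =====

-- B builds the same prefix -> ordered-unique-suffix dict by a different decomposition: one grouping
-- pass over consecutive triples (duplicates kept), then a separate order-preserving dedup pass.

-- ===== PORT A =====
-- body of A's loop for an already-computed prefix and suffix:
-- markov_dict.setdefault(prefix, [suffix]); if suffix not in markov_dict[prefix]: append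
def pmaStepA (pfx sfx : String) (d : PySem.Dict String (List String)) :
    PySem.Dict String (List String) :=
  let d1 := d.setdefault pfx [sfx]
  if sfx ∈ d1.getD pfx [] then d1 else d1.modify pfx [] (· ++ [sfx])

-- the 'for i, word in enumerate(words_list)' loop with its break; when the break has not fired,
-- words_list[i+1] and words_list[i+2] are in range, so the .getD "" default is never used.
def pmaLoopA (words_list : List String) :
    List (Int × String) → PySem.Dict String (List String) → PySem.Dict String (List String)
  | [], d => d
  | (i, word) :: rest, d =>
    if i > (words_list.length : Int) - 3 then d
    else
      let pfx := PySem.Str.join " " [word, (PySem.List.pyGet? words_list (i + 1)).getD ""]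
      let sfx := (PySem.List.pyGet? words_list (i + 2)).getD ""
      pmaLoopA words_list rest (pmaStepA pfx sfx d)

def perform_markov_analysis (words_list : List String) : List (String × List String) :=
  (pmaLoopA words_list (PySem.List.enumerate words_list) PySem.Dict.empty).items

-- ===== PORT B =====
-- zip(words_list, words_list[1:], words_list[2:])
def pmaTriples (words_list : List String) : List ((String × String) × String) :=
  (words_list.zip (PySem.List.slice words_list (some 1) none)).zip
    (PySem.List.slice words_list (some 2) none)

-- pass 1: markov_dict.setdefault(" ".join([w1, w2]), []).append(w3)
def pmaGroup (words_list : List String) : PySem.Dict String (List String) :=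
  (pmaTriples words_list).foldl
    (fun d t => d.modify (PySem.Str.join " " [t.1.1, t.1.2]) [] (· ++ [t.2]))
    PySem.Dict.empty

-- pass 2: {prefix: list(dict.fromkeys(suffixes)) for prefix, suffixes in markov_dict.items()}
def perform_markov_analysis_alt (words_list : List String) : List (String × List String) :=
  (pmaGroup words_list).items.map (fun p => (p.1, PySem.List.dedup p.2))

-- ===== PRECONDITION & SPEC =====
def Spec_perform_markov_analysis (words_list : List String) (out : List (String × List String)) : Prop := out = perform_markov_analysis_alt words_list
instance (words_list : List String) (out : List (String × List String)) : Decidable (Spec_perform_markov_analysis words_list out) := by unfold Spec_perform_markov_analysis; infer_instance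

-- ===== CLAIM (what is proved, stated in full; the proofs are below) =====
def Claim_equal_perform_markov_analysis : Prop := ∀ (words_list : List String), Dom_perform_markov_analysis words_list → Spec_perform_markov_analysis words_list (perform_markov_analysis words_list)

-- ===== LEMMAS AND PROOFS =====

-- value-wise image of a grouping-dict entry under ordered dedup
def pmaFk (p : String × List String) : String × List String := (p.1, PySem.List.dedup p.2)

theorem pma_map_fk (l : List (String × List String)) :
    l.map pmaFk = l.map (fun p => (p.1, PySem.List.dedup p.2)) := rfl

theorem pma_modify_eq {κ ν : Type} [BEq κ] (d : PySem.Dict κ ν) (k : κ) (d0 : ν) (f : ν → ν) :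
    d.modify k d0 f = d.insert k (f (d.getD k d0)) := rfl

theorem pma_dedup_append (v : List String) (s : String) :
    PySem.List.dedup (v ++ [s]) =
      if s ∈ v then PySem.List.dedup v else PySem.List.dedup v ++ [s] := by
  have h1 : PySem.List.dedup (v ++ [s]) = (PySem.Set.ofList v).add s := by
    simp [PySem.List.dedup, PySem.Set.ofList_append_singleton]
  rw [h1]
  by_cases h : s ∈ v
  · have hm : s ∈ PySem.Set.ofList v := (PySem.Set.mem_ofList v s).mpr h
    simp [PySem.Set.add, PySem.List.dedup, if_pos h, hm]
  · have hm : s ∉ PySem.Set.ofList v := fun hc => h ((PySem.Set.mem_ofList v s).mp hc)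
    simp [PySem.Set.add, PySem.List.dedup, if_neg h, hm]

theorem pma_nodup_fst_eq {α β : Type} {l : List (α × β)} (h : (l.map Prod.fst).Nodup)
    {p q : α × β} (hp : p ∈ l) (hq : q ∈ l) (he : p.1 = q.1) : p = q := by
  induction l with
  | nil => cases hp
  | cons a t ih =>
    rw [List.map_cons, List.nodup_cons] at h
    rcases List.mem_cons.mp hp with hpa | hpt
    · rcases List.mem_cons.mp hq with hqa | hqt
      · rw [hpa, hqa]
      · exfalso
        apply h.1
        rw [hpa] at he
        rw [he]
        exact List.mem_map.mpr ⟨q, hqt, rfl⟩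
    · rcases List.mem_cons.mp hq with hqa | hqt
      · exfalso
        apply h.1
        rw [hqa] at he
        rw [← he]
        exact List.mem_map.mpr ⟨p, hpt, rfl⟩
      · exact ih h.2 hpt hqt

theorem pma_keys_eq (d1 d2 : PySem.Dict String (List String))
    (h : d1.items = d2.items.map pmaFk) : d1.keys = d2.keys := by
  simp only [PySem.Dict.keys, h, List.map_map]
  exact List.map_congr_left (fun p _ => rfl)

theorem pma_fst_nodup (d : PySem.Dict String (List String)) (hnd : d.keys.Nodup) :
    (d.items.map Prod.fst).Nodup := by
  have : d.keys = d.items.map Prod.fst := by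
    simp only [PySem.Dict.keys]
  rwa [this] at hnd

-- one step of A's dedup-on-insert loop matches one step of B's grouping loop through dedup
theorem pma_step (d1 d2 : PySem.Dict String (List String))
    (h : d1.items = d2.items.map pmaFk) (hnd : d2.keys.Nodup) (pfx sfx : String) :
    (pmaStepA pfx sfx d1).items = (d2.modify pfx [] (· ++ [sfx])).items.map pmaFk
    ∧ (d2.modify pfx [] (· ++ [sfx])).keys.Nodup := by
  have hkeys : d1.keys = d2.keys := pma_keys_eq d1 d2 h
  have hnd1 : d1.keys.Nodup := hkeys ▸ hnd
  have hcont : d1.contains pfx = d2.contains pfx := by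
    rw [PySem.Dict.contains_eq_decide_mem_keys, PySem.Dict.contains_eq_decide_mem_keys, hkeys]
  by_cases hc : d2.contains pfx = true
  · -- prefix already present: d2 holds some v, d1 holds dedup v
    have hsome : (d2.get? pfx).isSome = true := by
      rw [← PySem.Dict.contains_eq_isSome_get? d2 pfx]; exact hc
    obtain ⟨v, hv⟩ := Option.isSome_iff_exists.mp hsome
    have hc1 : d1.contains pfx = true := by rw [hcont]; exact hc
    have hvmem : (pfx, v) ∈ d2.items := PySem.Dict.mem_items_of_get?_eq_some d2 hv
    have hv1 : d1.get? pfx = some (PySem.List.dedup v) := by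
      apply PySem.Dict.get?_of_mem_items d1 _ hnd1
      rw [h]
      exact List.mem_map.mpr ⟨(pfx, v), hvmem, rfl⟩
    have hgd1 : d1.getD pfx [] = PySem.List.dedup v :=
      PySem.Dict.getD_of_get?_eq_some d1 [] hv1
    have hgd2 : d2.getD pfx [] = v := PySem.Dict.getD_of_get?_eq_some d2 [] hv
    have hB : (d2.modify pfx [] (· ++ [sfx])) = d2.insert pfx (v ++ [sfx]) := by
      rw [pma_modify_eq, hgd2]
    have hBkeys : (d2.insert pfx (v ++ [sfx])).keys = d2.keys :=
      PySem.Dict.keys_insert_of_contains d2 (v ++ [sfx]) hc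
    have hsd : d1.setdefault pfx [sfx] = d1 := PySem.Dict.setdefault_of_contains d1 [sfx] hc1
    have hBitems := PySem.Dict.items_insert_of_contains d2 (v ++ [sfx]) hc
    refine ⟨?_, by rw [hB, hBkeys]; exact hnd⟩
    rw [hB, hBitems]
    by_cases hm : sfx ∈ v
    · -- suffix already recorded: A leaves d1 alone; B appends a duplicate that dedup removes
      have hmem' : sfx ∈ d1.getD pfx [] := by
        rw [hgd1]; exact (PySem.List.mem_dedup v sfx).mpr hm
      have hA : pmaStepA pfx sfx d1 = d1 := by
        simp only [pmaStepA, hsd]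
        rw [if_pos hmem']
      rw [hA, h, List.map_map]
      apply List.map_congr_left
      intro p hp
      by_cases hpk : p.1 = pfx
      · have hpv : p = (pfx, v) := pma_nodup_fst_eq (pma_fst_nodup d2 hnd) hp hvmem hpk
        simp only [hpv, Function.comp_apply, pmaFk, beq_self_eq_true, if_pos]
        rw [pma_dedup_append, if_pos hm]
      · simp only [Function.comp_apply]
        rw [if_neg (by simpa using hpk)]
    · -- new suffix: A appends it to the dedupped list; B appends it to the raw list
      have hmem' : sfx ∉ d1.getD pfx [] := by
        rw [hgd1]
        exact fun hcon => hm ((PySem.List.mem_dedup v sfx).mp hcon)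
      have hA : pmaStepA pfx sfx d1 = d1.insert pfx (PySem.List.dedup v ++ [sfx]) := by
        simp only [pmaStepA, hsd]
        rw [if_neg hmem', pma_modify_eq, hgd1]
      rw [hA, PySem.Dict.items_insert_of_contains d1 _ hc1, h, List.map_map, List.map_map]
      apply List.map_congr_left
      intro p hp
      by_cases hpk : p.1 = pfx
      · have hpv : p = (pfx, v) := pma_nodup_fst_eq (pma_fst_nodup d2 hnd) hp hvmem hpk
        simp only [hpv, Function.comp_apply, pmaFk, beq_self_eq_true, if_pos]
        rw [pma_dedup_append, if_neg hm]
      · simp only [Function.comp_apply, pmaFk]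
        rw [if_neg (by simpa using hpk), if_neg (by simpa using hpk)]
  · -- fresh prefix: both sides append a new (pfx, [sfx]) entry
    have hc' : d2.contains pfx = false := by
      cases hcc : d2.contains pfx
      · rfl
      · exact absurd hcc hc
    have hc1 : d1.contains pfx = false := by rw [hcont]; exact hc'
    have hnotmem : pfx ∉ d2.keys := fun hm => by
      have := (PySem.Dict.contains_iff_mem_keys d2 pfx).mpr hm
      rw [hc'] at this
      exact absurd this (by simp)
    have hB : (d2.modify pfx [] (· ++ [sfx])) = d2.insert pfx [sfx] := by
      rw [pma_modify_eq, PySem.Dict.getD_of_not_contains d2 [] hc']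
      rfl
    have hsd : d1.setdefault pfx [sfx] = d1.insert pfx [sfx] :=
      PySem.Dict.setdefault_of_not_contains d1 [sfx] hc1
    have hA : pmaStepA pfx sfx d1 = d1.insert pfx [sfx] := by
      simp only [pmaStepA, hsd]
      rw [if_pos (by rw [PySem.Dict.getD_insert_self]; exact List.mem_singleton.mpr rfl)]
    constructor
    · rw [hA, hB, PySem.Dict.items_insert_of_not_contains d1 _ hc1,
        PySem.Dict.items_insert_of_not_contains d2 _ hc', List.map_append, h]
      simp [pmaFk, PySem.List.dedup, PySem.Set.ofList, PySem.Set.add, PySem.Set.empty]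
    · rw [hB, PySem.Dict.keys_insert_of_not_contains d2 _ hc']
      simp [List.nodup_append, hnd]
      intro a ha hax
      exact hnotmem (hax ▸ ha)

-- A's fold and B's grouping fold stay related by value-wise dedup along any triple list
theorem pma_fold (L : List ((String × String) × String)) :
    ∀ (d1 d2 : PySem.Dict String (List String)),
      d1.items = d2.items.map pmaFk → d2.keys.Nodup →
      (L.foldl (fun d t => pmaStepA (PySem.Str.join " " [t.1.1, t.1.2]) t.2 d) d1).items
      = (L.foldl (fun d t => d.modify (PySem.Str.join " " [t.1.1, t.1.2]) [] (· ++ [t.2])) d2).items.map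
          pmaFk := by
  induction L with
  | nil => intro d1 d2 h _; simpa using h
  | cons t L ih =>
    intro d1 d2 h hnd
    simp only [List.foldl_cons]
    obtain ⟨h', hnd'⟩ := pma_step d1 d2 h hnd (PySem.Str.join " " [t.1.1, t.1.2]) t.2
    exact ih _ _ h' hnd'

theorem pma_triples_nil : pmaTriples [] = [] := by
  simp [pmaTriples]

theorem pma_triples_one (w : String) : pmaTriples [w] = [] := by
  have h1 := PySem.List.slice_from (xs := [w]) (a := 1) (by norm_num)
  have h2 := PySem.List.slice_from (xs := [w]) (a := 2) (by norm_num)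
  simp [pmaTriples, h1, h2]

theorem pma_triples_two (w x : String) : pmaTriples [w, x] = [] := by
  have h1 := PySem.List.slice_from (xs := [w, x]) (a := 1) (by norm_num)
  have h2 := PySem.List.slice_from (xs := [w, x]) (a := 2) (by norm_num)
  simp [pmaTriples, h1, h2]

theorem pma_triples_cons (a b c : String) (r : List String) :
    pmaTriples (a :: b :: c :: r) = ((a, b), c) :: pmaTriples (b :: c :: r) := by
  have h1 := PySem.List.slice_from (xs := a :: b :: c :: r) (a := 1) (by norm_num)
  have h2 := PySem.List.slice_from (xs := a :: b :: c :: r) (a := 2) (by norm_num)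
  have h3 := PySem.List.slice_from (xs := b :: c :: r) (a := 1) (by norm_num)
  have h4 := PySem.List.slice_from (xs := b :: c :: r) (a := 2) (by norm_num)
  simp [pmaTriples, h1, h2, h3, h4]

-- A's enumerate-and-break loop is the fold of pmaStepA over the consecutive triples
theorem pma_loopA_eq (ws : List String) (l : List String) :
    ∀ (k : Nat) (d : PySem.Dict String (List String)), ws.drop k = l →
    pmaLoopA ws (PySem.List.enumerate l (k : Int)) d
    = (pmaTriples l).foldl (fun d t => pmaStepA (PySem.Str.join " " [t.1.1, t.1.2]) t.2 d) d := by
  induction l with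
  | nil =>
    intro k d _
    simp [PySem.List.enumerate_nil, pmaLoopA, pma_triples_nil]
  | cons w rest ih =>
    intro k d hdrop
    rw [PySem.List.enumerate_cons]
    simp only [pmaLoopA]
    rcases rest with _ | ⟨w2, _ | ⟨w3, r3⟩⟩
    · have hl : ws.length = k + 1 := by
        have h := congrArg List.length hdrop
        rw [List.length_drop] at h
        simp at h
        omega
      rw [if_pos (by omega : (k : Int) > (ws.length : Int) - 3)]
      simp [pma_triples_one]
    · have hl : ws.length = k + 2 := by
        have h := congrArg List.length hdrop
        rw [List.length_drop] at h
        simp at h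
        omega
      rw [if_pos (by omega : (k : Int) > (ws.length : Int) - 3)]
      simp [pma_triples_two]
    · have hl : ws.length = k + r3.length + 3 := by
        have h := congrArg List.length hdrop
        rw [List.length_drop] at h
        simp at h
        omega
      rw [if_neg (by omega : ¬ (k : Int) > (ws.length : Int) - 3)]
      have hd1 : ws.drop (k + 1) = w2 :: w3 :: r3 := by
        rw [← List.drop_drop, hdrop]
        rfl
      have hd2 : ws.drop (k + 2) = w3 :: r3 := by
        rw [← List.drop_drop, hdrop]
        rfl
      have hg1 : PySem.List.pyGet? ws ((k : Int) + 1) = some w2 := by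
        have hcast : ((k : Int) + 1) = ((k + 1 : Nat) : Int) := by push_cast; ring
        rw [hcast, PySem.List.pyGet?_natCast, ← List.head?_drop, hd1]
        rfl
      have hg2 : PySem.List.pyGet? ws ((k : Int) + 2) = some w3 := by
        have hcast : ((k : Int) + 2) = ((k + 2 : Nat) : Int) := by push_cast; ring
        rw [hcast, PySem.List.pyGet?_natCast, ← List.head?_drop, hd2]
        rfl
      rw [pma_triples_cons]
      simp only [List.foldl_cons, hg1, hg2, Option.getD_some]
      have hcast2 : ((k : Int) + 1) = ((k + 1 : Nat) : Int) := by push_cast; ring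
      rw [hcast2]
      exact ih (k + 1) _ hd1

-- ===== VERDICT (by name: the statement is the Claim_ definition above) =====
theorem perform_markov_analysis_spec : Claim_equal_perform_markov_analysis := by
  intro ws _
  unfold Spec_perform_markov_analysis
  have hloop := pma_loopA_eq ws ws 0 PySem.Dict.empty (by simp : ws.drop 0 = ws)
  rw [Nat.cast_zero] at hloop
  have hrel : (PySem.Dict.empty : PySem.Dict String (List String)).items
      = (PySem.Dict.empty : PySem.Dict String (List String)).items.map pmaFk := rfl
  have hfold := pma_fold (pmaTriples ws) PySem.Dict.empty PySem.Dict.empty hrel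
    PySem.Dict.nodup_keys_empty
  unfold perform_markov_analysis perform_markov_analysis_alt pmaGroup
  rw [← pma_map_fk, hloop]
  exact hfold
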